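-- pv_equiv track=rewrite | github.com/garyarzuma/advent_of_code | 2024/14/robot_bathroom_tree.py | getNextLoc
-- ===== SOURCE A (Python) =====
-- width = 101
--
-- length = 103
--
-- def getNextLoc(loc, v, mWidth, mLength):
--     nLocX, nLocY = loc[0] + v[0], loc[1] + v[1]
--     while nLocX >= width:
--         nLocX -= width
--     while nLocY >= length:
--         nLocY -= length
--     while nLocX < 0:
--         nLocX += width
--     while nLocY < 0:
--         nLocY += length
--     return (nLocX, nLocY)
-- ===== SOURCE B (Python) =====
-- width = 101
--
-- length = 103
--
-- def getNextLoc(loc, v, mWidth, mLength):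
--     # idiomatic: closed-form wraparound via modulo instead of repeated add/subtract loops
--     return ((loc[0] + v[0]) % width, (loc[1] + v[1]) % length)
-- ===== Notes on version B (the rewrite author's own statement) =====
-- stated objective: idiomatic
-- what changed: Replaces the four while loops that repeatedly subtract/add the grid dimension with a single closed-form modulo per coordinate.
import Mathlib
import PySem

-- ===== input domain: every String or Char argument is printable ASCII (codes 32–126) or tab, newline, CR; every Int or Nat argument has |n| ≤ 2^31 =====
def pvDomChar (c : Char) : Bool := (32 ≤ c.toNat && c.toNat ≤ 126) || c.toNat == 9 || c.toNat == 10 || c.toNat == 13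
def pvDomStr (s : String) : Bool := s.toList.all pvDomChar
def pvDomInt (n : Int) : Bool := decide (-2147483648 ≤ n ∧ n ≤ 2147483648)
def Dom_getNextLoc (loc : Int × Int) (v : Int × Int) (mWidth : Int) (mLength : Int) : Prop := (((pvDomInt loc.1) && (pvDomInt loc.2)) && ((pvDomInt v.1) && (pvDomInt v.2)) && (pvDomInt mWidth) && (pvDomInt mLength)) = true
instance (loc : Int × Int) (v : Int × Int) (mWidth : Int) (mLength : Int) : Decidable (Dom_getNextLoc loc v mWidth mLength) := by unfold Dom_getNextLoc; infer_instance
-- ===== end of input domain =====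

-- B replaces A's four wraparound while-loops by one closed-form modulo per coordinate (idiomatic).

-- ===== PORT A =====
-- module-level constants of Source A
def pyWidth : Int := 101
def pyLength : Int := 103

-- 'while x >= m: x -= m'; the '1 ≤ m' conjunct is only a totality guard (here m is 101/103)
def pvSubLoop (m : Int) (x : Int) : Int :=
  if 1 ≤ m ∧ m ≤ x then pvSubLoop m (x - m) else x
termination_by x.toNat
decreasing_by omega

-- 'while x < 0: x += m'; the '1 ≤ m' conjunct is only a totality guard
def pvAddLoop (m : Int) (x : Int) : Int :=
  if 1 ≤ m ∧ x < 0 then pvAddLoop m (x + m) else x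
termination_by (-x).toNat
decreasing_by omega

def getNextLoc (loc : Int × Int) (v : Int × Int) (mWidth : Int) (mLength : Int) : Int × Int :=
  let nLocX := loc.1 + v.1
  let nLocY := loc.2 + v.2
  let nLocX := pvSubLoop pyWidth nLocX
  let nLocY := pvSubLoop pyLength nLocY
  let nLocX := pvAddLoop pyWidth nLocX
  let nLocY := pvAddLoop pyLength nLocY
  (nLocX, nLocY)

-- ===== PORT B =====
def getNextLoc_alt (loc : Int × Int) (v : Int × Int) (mWidth : Int) (mLength : Int) : Int × Int :=
  (PySem.Int.mod (loc.1 + v.1) pyWidth, PySem.Int.mod (loc.2 + v.2) pyLength)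

-- ===== PRECONDITION & SPEC =====
def Spec_getNextLoc (loc : Int × Int) (v : Int × Int) (mWidth : Int) (mLength : Int) (out : Int × Int) : Prop := out = getNextLoc_alt loc v mWidth mLength
instance (loc : Int × Int) (v : Int × Int) (mWidth : Int) (mLength : Int) (out : Int × Int) : Decidable (Spec_getNextLoc loc v mWidth mLength out) := by unfold Spec_getNextLoc; infer_instance

-- ===== CLAIM (what is proved, stated in full; the proofs are below) =====
def Claim_equal_getNextLoc : Prop := ∀ (loc : Int × Int) (v : Int × Int) (mWidth : Int) (mLength : Int), Dom_getNextLoc loc v mWidth mLength → Spec_getNextLoc loc v mWidth mLength (getNextLoc loc v mWidth mLength)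

-- ===== LEMMAS AND PROOFS =====

theorem pvSubLoop_spec (m : Int) (hm : 1 ≤ m) : ∀ x : Int, pvSubLoop m x < m ∧ pvSubLoop m x % m = x % m := by
  intro x
  induction x using pvSubLoop.induct m with
  | case1 x h ih =>
    rw [pvSubLoop, if_pos h]
    exact ⟨ih.1, ih.2.trans (Int.sub_emod_right x m)⟩
  | case2 x h =>
    rw [pvSubLoop, if_neg h]
    exact ⟨by omega, rfl⟩

theorem pvAddLoop_spec (m : Int) (hm : 1 ≤ m) : ∀ x : Int, x < m → 0 ≤ pvAddLoop m x ∧ pvAddLoop m x < m ∧ pvAddLoop m x % m = x % m := by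
  intro x
  induction x using pvAddLoop.induct m with
  | case1 x h ih =>
    intro hx
    rw [pvAddLoop, if_pos h]
    obtain ⟨h1, h2, h3⟩ := ih (by omega)
    exact ⟨h1, h2, h3.trans (Int.add_emod_right x m)⟩
  | case2 x h =>
    intro hx
    rw [pvAddLoop, if_neg h]
    exact ⟨by omega, hx, rfl⟩

theorem pvWrap (m : Int) (hm : 1 ≤ m) (x : Int) : pvAddLoop m (pvSubLoop m x) = x % m := by
  obtain ⟨hlt, hmod⟩ := pvSubLoop_spec m hm x
  obtain ⟨h0, h1, h2⟩ := pvAddLoop_spec m hm _ hlt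
  have := Int.emod_emod_of_dvd (pvAddLoop m (pvSubLoop m x)) (dvd_refl m)
  rw [Int.emod_eq_of_lt h0 h1] at this
  omega

-- ===== VERDICT (by name: the statement is the Claim_ definition above) =====
theorem getNextLoc_spec : Claim_equal_getNextLoc := by
  intro loc v mWidth mLength _
  show _ = _
  unfold getNextLoc getNextLoc_alt
  have hw : PySem.Int.mod (loc.1 + v.1) pyWidth = (loc.1 + v.1) % pyWidth :=
    PySem.Int.mod_eq_emod_of_pos (by decide)
  have hl : PySem.Int.mod (loc.2 + v.2) pyLength = (loc.2 + v.2) % pyLength :=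
    PySem.Int.mod_eq_emod_of_pos (by decide)
  simp only [hw, hl, pvWrap pyWidth (by decide), pvWrap pyLength (by decide)]
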